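-- pv_equiv track=rewrite | github.com/mirabelluo/HSWET_2025_CPY | HSWET_2025-main/05_variable_load/r_comb_v2.py | generate_block_configurations
-- ===== SOURCE A (Python) =====
-- import itertools
--
-- def generate_block_configurations(block):
--     """
--     Generates the switch configurations for a given block.
--     For a single-resistor block, generate [[0]] and [[1]].
--     For a multi-resistor block:
--       - Always generate the "off" configuration: [0] + [0]*len(block).
--       - For the "on" case (first switch is 1), generate all combinations for the individual resistors.
--     Returns a list of lists (each inner list is the switch configuration for the block).
--     """
--     if len(block) == 1:
--         return [[0], [1]]
--     else:
--         configs = []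
--         # Off configuration: block switch off => canonical configuration.
--         off_config = [0] + [0] * len(block)
--         configs.append(off_config)
--         # On configurations: block switch on + all combinations of internal switches.
--         n = len(block)
--         # Generate all combinations for n individual switches.
--         for bits in itertools.product([0, 1], repeat=n):
--             # Only include "on" configuration if at least one resistor is on.
--             if any(bits):
--                 config = [1] + list(bits)
--                 configs.append(config)
--         return configs
-- ===== SOURCE B (Python) =====
-- def _bits(n, m):
--     """MSB-first binary digits of m, width n."""
--     out = []
--     while n:
--         p = 2 ** (n - 1)
--         out.append(m // p)
--         m %= p
--         n -= 1
--     return out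
--
-- def generate_block_configurations(block):
--     n = len(block)
--     if n == 1:
--         return [[0], [1]]
--     return [[0] * (n + 1)] + [[1] + _bits(n, i) for i in range(1, 2 ** n)]
-- ===== Notes on version B (the rewrite author's own statement) =====
-- stated objective: alternative
-- what changed: Replaces itertools.product over n binary switches plus an any(bits) filter by direct arithmetic decoding of the integers i = 1 .. 2^n-1 into MSB-first bit lists, so the all-zero combination is never generated and no filtering pass is needed.
import Mathlib
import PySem

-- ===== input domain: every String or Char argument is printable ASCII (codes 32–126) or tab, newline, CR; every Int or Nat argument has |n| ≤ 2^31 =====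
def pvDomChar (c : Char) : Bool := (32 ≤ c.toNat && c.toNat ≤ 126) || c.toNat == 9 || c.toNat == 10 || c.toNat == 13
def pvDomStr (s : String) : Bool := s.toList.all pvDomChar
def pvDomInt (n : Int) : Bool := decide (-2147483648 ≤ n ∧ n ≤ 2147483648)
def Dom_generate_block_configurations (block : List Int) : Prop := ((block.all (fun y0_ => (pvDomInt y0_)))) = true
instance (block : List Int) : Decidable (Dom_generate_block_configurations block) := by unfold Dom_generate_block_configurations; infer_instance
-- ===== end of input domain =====

-- B replaces itertools.product + any() filter by direct enumeration of the bitmask i = 1 … 2^n-1 (alternative decomposition, same cost).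

-- ===== PORT A =====
-- itertools.product([0, 1], repeat=n), lexicographic (first coordinate varies slowest)
def pvProdBits : Nat → List (List Int)
  | 0 => [[]]
  | n + 1 => ([0, 1] : List Int).flatMap (fun b => (pvProdBits n).map (fun rest => b :: rest))

def generate_block_configurations (block : List Int) : List (List Int) :=
  if block.length == 1 then [[0], [1]]
  else
    let n := block.length
    (pvProdBits n).foldl
      (fun cfgs bits => if bits.any (fun b => b != 0) then cfgs ++ [1 :: bits] else cfgs)
      [0 :: List.replicate n 0]

-- ===== PORT B =====
-- _bits(n, m): MSB-first binary digits of m, width n (accumulator loop 'while n: out.append(m // p); m %= p; n -= 1')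
def pvBitsLoop : Nat → Int → List Int → List Int
  | 0, _, out => out
  | n + 1, m, out => pvBitsLoop n (PySem.Int.mod m (2 ^ n)) (out ++ [PySem.Int.floordiv m (2 ^ n)])

def generate_block_configurations_alt (block : List Int) : List (List Int) :=
  let n := block.length
  if n == 1 then [[0], [1]]
  else List.replicate (n + 1) 0 :: (PySem.List.pyRange 1 (2 ^ n) 1).map (fun i => 1 :: pvBitsLoop n i [])

-- ===== PRECONDITION & SPEC =====
def Spec_generate_block_configurations (block : List Int) (out : List (List Int)) : Prop := out = generate_block_configurations_alt block
instance (block : List Int) (out : List (List Int)) : Decidable (Spec_generate_block_configurations block out) := by unfold Spec_generate_block_configurations; infer_instance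

-- ===== CLAIM (what is proved, stated in full; the proofs are below) =====
def Claim_equal_generate_block_configurations : Prop := ∀ (block : List Int), Dom_generate_block_configurations block → Spec_generate_block_configurations block (generate_block_configurations block)

-- ===== LEMMAS AND PROOFS =====

-- proof-side helper: pvBitsLoop written as a pure cons-recursion
def pvAltBits : Nat → Int → List Int
  | 0, _ => []
  | n + 1, m => PySem.Int.floordiv m (2 ^ n) :: pvAltBits n (PySem.Int.mod m (2 ^ n))

lemma pvBitsLoop_eq (n : Nat) : ∀ (m : Int) (out : List Int), pvBitsLoop n m out = out ++ pvAltBits n m := by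
  induction n with
  | zero => intro m out; simp [pvBitsLoop, pvAltBits]
  | succ n ih => intro m out; rw [pvBitsLoop, pvAltBits, ih, List.append_assoc]; rfl

-- pvAltBits on a natural-number argument, digit extraction made explicit
lemma pvAltBits_natCast (n i : Nat) :
    pvAltBits (n + 1) (i : Int) = ((i / 2 ^ n : Nat) : Int) :: pvAltBits n ((i % 2 ^ n : Nat) : Int) := by
  have h2 : ((2 : Int) ^ n) = ((2 ^ n : Nat) : Int) := by push_cast; ring
  rw [pvAltBits, h2, PySem.Int.floordiv_natCast, PySem.Int.mod_natCast]

-- the product list is exactly the bit decodings of 0 … 2^n - 1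
lemma pvProdBits_eq_map_range (n : Nat) :
    pvProdBits n = (List.range (2 ^ n)).map (fun i : Nat => pvAltBits n (i : Int)) := by
  induction n with
  | zero => rfl
  | succ n ih =>
    have hsplit : List.range (2 ^ (n + 1)) = List.range (2 ^ n) ++ (List.range (2 ^ n)).map (fun i => 2 ^ n + i) := by
      rw [pow_succ, Nat.mul_two, List.range_add]
    rw [hsplit, List.map_append, List.map_map]
    have h1 : (List.range (2 ^ n)).map (fun i : Nat => pvAltBits (n + 1) (i : Int))
        = (pvProdBits n).map (fun rest => (0 : Int) :: rest) := by
      rw [ih, List.map_map]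
      refine List.map_congr_left (fun i hi => ?_)
      have hi' : i < 2 ^ n := List.mem_range.mp hi
      simp [pvAltBits_natCast, Nat.div_eq_of_lt hi', Nat.mod_eq_of_lt hi']
    have h2 : (List.range (2 ^ n)).map ((fun i : Nat => pvAltBits (n + 1) (i : Int)) ∘ fun i => 2 ^ n + i)
        = (pvProdBits n).map (fun rest => (1 : Int) :: rest) := by
      rw [ih, List.map_map]
      refine List.map_congr_left (fun i hi => ?_)
      have hi' : i < 2 ^ n := List.mem_range.mp hi
      have hpos : 0 < 2 ^ n := Nat.pos_of_ne_zero (by positivity)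
      have hd : (2 ^ n + i) / 2 ^ n = 1 := by
        rw [Nat.add_div_left i hpos, Nat.div_eq_of_lt hi']
      have hm : (2 ^ n + i) % 2 ^ n = i := by
        rw [Nat.add_mod_left, Nat.mod_eq_of_lt hi']
      show pvAltBits (n + 1) ((2 ^ n + i : Nat) : Int) = 1 :: pvAltBits n (i : Int)
      rw [pvAltBits_natCast, hd, hm]
      norm_num
    simp [pvProdBits, List.flatMap, h1, h2]

-- the bit decoding of i has a nonzero digit iff i ≠ 0
lemma pvAltBits_any_ne_zero (n : Nat) : ∀ i : Nat, i < 2 ^ n →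
    ((pvAltBits n (i : Int)).any (fun b => b != 0)) = (i != 0) := by
  induction n with
  | zero => intro i hi; interval_cases i; simp [pvAltBits]
  | succ n ih =>
    intro i hi
    have hpos : 0 < 2 ^ n := Nat.pos_of_ne_zero (by positivity)
    have hmod : i % 2 ^ n < 2 ^ n := Nat.mod_lt _ hpos
    rw [pvAltBits_natCast, List.any_cons, ih _ hmod]
    rcases Nat.eq_zero_or_pos i with h | h
    · simp [h]
    · have hi0 : (i != 0) = true := by simp; omega
      have hsplit : i / 2 ^ n ≠ 0 ∨ i % 2 ^ n ≠ 0 := by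
        by_contra hc
        rw [not_or, not_not, not_not] at hc
        obtain ⟨hc1, hc2⟩ := hc
        have hlt : i < 2 ^ n := by
          rcases Nat.div_eq_zero_iff.mp hc1 with hz | hz
          · omega
          · exact hz
        rw [Nat.mod_eq_of_lt hlt] at hc2
        omega
      rcases hsplit with h' | h'
      · have hb : (((i / 2 ^ n : Nat) : Int) != 0) = true := by
          rw [bne_iff_ne]
          exact_mod_cast h'
        rw [hb, hi0, Bool.true_or]
      · have hb : ((i % 2 ^ n : Nat) != 0) = true := by
          rw [bne_iff_ne]
          exact h'
        rw [hb, hi0, Bool.or_true]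

-- the main computation identity (holds for every n, the n = 1 branch included separately)
lemma pv_main (n : Nat) :
    (pvProdBits n).foldl
      (fun cfgs bits => if bits.any (fun b => b != 0) then cfgs ++ [1 :: bits] else cfgs)
      [0 :: List.replicate n 0]
    = List.replicate (n + 1) 0 :: (PySem.List.pyRange 1 (2 ^ n) 1).map (fun i => 1 :: pvBitsLoop n i []) := by
  have hbl : (fun i : Int => (1 : Int) :: pvBitsLoop n i []) = fun i : Int => 1 :: pvAltBits n i := by
    funext i; rw [pvBitsLoop_eq, List.nil_append]
  rw [hbl, pvProdBits_eq_map_range,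
      PySem.List.foldl_append_if (fun bits : List Int => bits.any (fun b => b != 0)) (fun bits : List Int => 1 :: bits),
      List.filter_map]
  have hfil : (List.range (2 ^ n)).filter
        ((fun bits : List Int => bits.any (fun b => b != 0)) ∘ (fun i : Nat => pvAltBits n (i : Int)))
      = (List.range (2 ^ n)).filter (fun i => i != 0) := by
    refine List.filter_congr (fun i hi => ?_)
    simpa using pvAltBits_any_ne_zero n i (List.mem_range.mp hi)
  rw [hfil]
  have hpos : 0 < 2 ^ n := Nat.pos_of_ne_zero (by positivity)
  have hran : List.range (2 ^ n) = 0 :: (List.range (2 ^ n - 1)).map (fun k => k + 1) := by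
    conv_lhs => rw [show 2 ^ n = (2 ^ n - 1) + 1 by omega]
    rw [List.range_succ_eq_map]
  have ht : ((2 : Int) ^ n - 1).toNat = 2 ^ n - 1 := by
    have h2 : ((2 : Int) ^ n) = ((2 ^ n : Nat) : Int) := by push_cast; ring
    omega
  have hpy : PySem.List.pyRange 1 ((2 : Int) ^ n) 1 = (List.range (2 ^ n - 1)).map (fun k : Nat => (1 : Int) + k) := by
    rw [PySem.List.pyRange_one, ht]
  rw [hran, hpy, List.filter_cons]
  have h00 : (((0 : Nat) != 0)) = false := by simp
  rw [h00]
  simp only [Bool.false_eq_true, if_false, List.filter_map, List.map_map]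
  have hall : (List.range (2 ^ n - 1)).filter ((fun i : Nat => i != 0) ∘ fun k => k + 1) = List.range (2 ^ n - 1) :=
    List.filter_eq_self.mpr (fun k _ => by simp)
  rw [hall, List.singleton_append]
  refine congrArg₂ List.cons (List.replicate_succ (α := Int) ..).symm (List.map_congr_left fun k hk => ?_)
  simp only [Function.comp_apply]
  have hc : ((k + 1 : Nat) : Int) = 1 + (k : Int) := by push_cast; ring
  rw [hc]

-- ===== VERDICT (by name: the statement is the Claim_ definition above) =====
theorem generate_block_configurations_spec : Claim_equal_generate_block_configurations := by
  intro block _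
  unfold Spec_generate_block_configurations generate_block_configurations generate_block_configurations_alt
  by_cases h : block.length = 1
  · simp [h]
  · simp only [beq_iff_eq, if_neg h]
    exact pv_main block.length
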